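-- pv_equiv track=rewrite | github.com/ttttmmttddiikk/Energy_Landscape_Analysis | func_ELA/ELA_Network_functions.py | return_AS_binary
-- ===== SOURCE A (Python) =====
-- def return_AS_binary(state_str :str) -> list:
--     #-------------------------
--     # check 0 or 1
--     unique_var_list = list(set(list(state_str)))
--     for _, unique_var in enumerate(unique_var_list):
--         if unique_var != "0" and unique_var != "1":
--             raise ValueError("state must be 0 or 1")
--     #-------------------------
--     # make Adjacent States
--     AS_list = []
--     for cnt, var in enumerate(state_str):
--         # var_reversal
--         var_reversal = "1" if var=="0" else "0"
--         # AS
--         AS = state_str[:cnt]+var_reversal+state_str[cnt+1:]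
--         # append
--         AS_list.append(AS)
--     return AS_list
-- ===== SOURCE B (Python) =====
-- def return_AS_binary(state_str: str) -> list:
--     # validate: every character must be '0' or '1'
--     if not set(state_str) <= {"0", "1"}:
--         raise ValueError("state must be 0 or 1")
--     # build back-to-front: walk the string from the right, maintaining the
--     # already-seen suffix and the neighbor list of that suffix
--     neighbors = []
--     suffix = ""
--     for c in reversed(state_str):
--         flipped = "1" if c == "0" else "0"
--         neighbors = [flipped + suffix] + [c + t for t in neighbors]
--         suffix = c + suffix
--     return neighbors
-- ===== Notes on version B (the rewrite author's own statement) =====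
-- stated objective: alternative
-- what changed: B validates with a set-subset test and builds the neighbor list back-to-front in one right-to-left pass, maintaining the current suffix and extending the suffix's neighbor list, instead of A's per-index string slicing state_str[:cnt]+flip+state_str[cnt+1:].
import Mathlib
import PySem

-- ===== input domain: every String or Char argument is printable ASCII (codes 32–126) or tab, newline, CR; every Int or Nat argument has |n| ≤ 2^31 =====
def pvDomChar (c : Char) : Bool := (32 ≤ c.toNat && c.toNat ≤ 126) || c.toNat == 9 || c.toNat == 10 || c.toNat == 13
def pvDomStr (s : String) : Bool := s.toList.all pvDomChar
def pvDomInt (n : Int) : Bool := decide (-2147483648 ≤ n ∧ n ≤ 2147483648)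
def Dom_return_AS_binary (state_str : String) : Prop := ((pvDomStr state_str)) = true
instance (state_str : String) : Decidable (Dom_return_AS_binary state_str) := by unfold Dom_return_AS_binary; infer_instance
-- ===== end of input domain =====

-- B builds the neighbor list back-to-front in one right-to-left pass (suffix + its neighbor list)
-- instead of A's per-index slicing; equal on all all-binary strings (Pre_), both raise ValueError otherwise.

-- ===== PORT A =====
-- var_reversal = "1" if var=="0" else "0"
def pvFlip (c : Char) : Char := if c = '0' then '1' else '0'

-- strings are handled as their char lists (String.ofList at the end); slicing via PySem.List.slice, exact
def return_AS_binary (state_str : String) : List String :=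
  let chars := state_str.toList
  let unique_var_list := PySem.Set.ofList chars
  if unique_var_list.all (fun c => c == '0' || c == '1') then
    (PySem.List.enumerate chars 0).foldl
      (fun AS_list p =>
        AS_list ++ [String.ofList (PySem.List.slice chars none (some p.1)
          ++ [pvFlip p.2] ++ PySem.List.slice chars (some (p.1 + 1)) none)])
      []
  else []  -- Python raises ValueError here: outside Pre_

-- ===== PORT B =====
-- one step of Source B's right-to-left loop: state = (neighbors, suffix)
def pvStepB (c : Char) (st : List (List Char) × List Char) : List (List Char) × List Char :=
  ((pvFlip c :: st.2) :: st.1.map (fun t => c :: t), c :: st.2)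

def return_AS_binary_alt (state_str : String) : List String :=
  let chars := state_str.toList
  if chars.all (fun c => c == '0' || c == '1') then
    (chars.foldr pvStepB ([], [])).1.map String.ofList
  else []  -- Python raises ValueError here: outside Pre_

-- ===== PRECONDITION & SPEC =====
-- Pre_ excludes exactly the inputs containing a character other than '0'/'1', on which A raises ValueError
def Pre_return_AS_binary (state_str : String) : Prop :=
  (state_str.toList.all (fun c => c == '0' || c == '1')) = true
instance (state_str : String) : Decidable (Pre_return_AS_binary state_str) := by
  unfold Pre_return_AS_binary; infer_instance

def pvWitness_return_AS_binary : String := "0110"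

def Spec_return_AS_binary (state_str : String) (out : List String) : Prop := out = return_AS_binary_alt state_str
instance (state_str : String) (out : List String) : Decidable (Spec_return_AS_binary state_str out) := by unfold Spec_return_AS_binary; infer_instance

-- ===== CLAIM (what is proved, stated in full; the proofs are below) =====
def Claim_equal_return_AS_binary : Prop := ∀ (state_str : String), Dom_return_AS_binary state_str → Pre_return_AS_binary state_str → Spec_return_AS_binary state_str (return_AS_binary state_str)

-- ===== LEMMAS AND PROOFS =====

-- the pure neighbor list computed by B's loop
def pvNbrs : List Char → List (List Char)
  | [] => []
  | c :: t => (pvFlip c :: t) :: (pvNbrs t).map (fun u => c :: u)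

theorem pvFoldrB (t : List Char) : t.foldr pvStepB ([], []) = (pvNbrs t, t) := by
  induction t with
  | nil => rfl
  | cons c u ih => simp [pvNbrs, pvStepB, ih]

theorem pvFoldlPush {α β : Type} (f : α → β) :
    ∀ (l : List α) (init : List β),
      l.foldl (fun acc x => acc ++ [f x]) init = init ++ l.map f := by
  intro l
  induction l with
  | nil => simp
  | cons x xs ih => intro init; simp [List.foldl, ih]

theorem pvMain (t : List Char) : ∀ (pre : List Char),
    (PySem.List.enumerate t (pre.length : Int)).map
      (fun p => PySem.List.slice (pre ++ t) none (some p.1)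
        ++ [pvFlip p.2] ++ PySem.List.slice (pre ++ t) (some (p.1 + 1)) none)
    = (pvNbrs t).map (fun u => pre ++ u) := by
  induction t with
  | nil => intro pre; simp [PySem.List.enumerate_nil, pvNbrs]
  | cons c u ih =>
    intro pre
    rw [PySem.List.enumerate_cons]
    have h1 : PySem.List.slice (pre ++ c :: u) none (some ((pre.length : Nat) : Int))
        = pre := by
      rw [PySem.List.slice_to_natCast]
      simp
    have h2 : ((pre.length : Int) + 1) = (((pre.length + 1 : Nat)) : Int) := by push_cast; ring
    have h3 : PySem.List.slice (pre ++ c :: u) (some ((pre.length : Int) + 1)) none = u := by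
      rw [h2, PySem.List.slice_from_natCast]
      have : pre ++ c :: u = (pre ++ [c]) ++ u := by simp
      rw [this]
      have hlen : pre.length + 1 = (pre ++ [c]).length := by simp
      rw [hlen, List.drop_left]
    have hpre : ((pre.length : Int) + 1) = (((pre ++ [c]).length : Nat) : Int) := by
      simp
    have happ : pre ++ c :: u = (pre ++ [c]) ++ u := by simp
    have ih' := ih (pre ++ [c])
    rw [← hpre, ← happ] at ih'
    simp only [List.map_cons, h1, h3, ih', pvNbrs, List.map_map]
    simp

theorem return_AS_binary_spec : Claim_equal_return_AS_binary := by
  intro s _hd hpre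
  unfold Spec_return_AS_binary return_AS_binary return_AS_binary_alt
  have hallB : s.toList.all (fun c => c == '0' || c == '1') = true := hpre
  have hallA : (PySem.Set.ofList s.toList).all (fun c => c == '0' || c == '1') = true := by
    rw [List.all_eq_true]
    intro c hc
    exact List.all_eq_true.mp hallB c ((PySem.List.mem_dedup _ _).mp hc)
  simp only [hallA, hallB, if_true]
  have hmain := pvMain s.toList []
  simp only [List.nil_append, List.length_nil, Nat.cast_zero, List.map_id'] at hmain
  rw [pvFoldrB]
  simp only [pvFoldlPush, List.nil_append]
  rw [← hmain, List.map_map]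
  rfl
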